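-- pv_equiv track=rewrite | github.com/YeakubSadlil/Python-Local-Files | CP-Excercise/test23.py | findMaximumProfit
-- ===== SOURCE A (Python) =====
-- def findMaximumProfit(category, price):
--     n = len(category)
--
--     # Create a list of tuples (category, price) and sort it by price in descending order
--     items = [(category[i], price[i]) for i in range(n)]
--     items.sort(key=lambda x: x[1], reverse=True)
--
--     total_profit = 0
--     category_count = {}
--
--     for cat, pri in items:
--         if cat not in category_count:
--             category_count[cat] = 0
--         category_count[cat] += 1
--         profit = pri * category_count[cat]
--         total_profit += profit
--
--     return total_profit
-- ===== SOURCE B (Python) =====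
-- def findMaximumProfit(category, price):
--     groups = {}
--     for c, p in zip(category, price):
--         groups.setdefault(c, []).append(p)
--     total_profit = 0
--     for ps in groups.values():
--         ps.sort(reverse=True)
--         total_profit += sum(p * (i + 1) for i, p in enumerate(ps))
--     return total_profit
-- ===== Notes on version B (the rewrite author's own statement) =====
-- stated objective: alternative
-- what changed: A sorts all (category, price) pairs globally by price descending and walks them with a running per-category counter dict; B instead groups prices per category in one dict pass, sorts each group descending and sums price*(rank+1) group by group.
import Mathlib
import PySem

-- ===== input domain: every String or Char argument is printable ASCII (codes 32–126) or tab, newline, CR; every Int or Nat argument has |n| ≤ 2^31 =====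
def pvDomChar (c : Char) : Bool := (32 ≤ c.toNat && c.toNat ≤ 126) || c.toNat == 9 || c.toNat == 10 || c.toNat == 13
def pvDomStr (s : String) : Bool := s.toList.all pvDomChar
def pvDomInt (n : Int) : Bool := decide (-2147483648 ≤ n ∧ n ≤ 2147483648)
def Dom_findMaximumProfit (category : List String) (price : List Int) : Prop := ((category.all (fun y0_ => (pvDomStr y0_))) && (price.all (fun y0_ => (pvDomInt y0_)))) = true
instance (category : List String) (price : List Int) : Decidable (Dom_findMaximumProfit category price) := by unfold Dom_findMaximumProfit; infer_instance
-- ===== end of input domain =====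

-- B replaces A's global descending sort plus a running per-category counter by grouping the
-- prices per category in one dict pass and sorting each group descending (objective: alternative decomposition).

-- ===== PORT A =====
def findMaximumProfit (category : List String) (price : List Int) : Int :=
  let n := category.length
  let items := (List.range n).map (fun (i : Nat) =>
    (PySem.List.pyGetD category (i : Int) "", PySem.List.pyGetD price (i : Int) 0))
  let items2 := PySem.List.sorted items (fun x => x.2) true
  (items2.foldl (fun (st : Int × PySem.Dict String Int) cp =>
      let d0 := st.2
      let d1 := if d0.contains cp.1 then d0 else d0.insert cp.1 0
      let d2 := d1.insert cp.1 (d1.getD cp.1 0 + 1)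
      (st.1 + cp.2 * d2.getD cp.1 0, d2)) ((0 : Int), PySem.Dict.empty)).1

-- ===== PORT B =====
-- sum(p * (i + 1) for i, p in enumerate(ps))
def pvWsum (xs : List Int) : Int :=
  ((PySem.List.enumerate xs 0).map (fun ip => ip.2 * (ip.1 + 1))).sum

def findMaximumProfit_alt (category : List String) (price : List Int) : Int :=
  let groups : PySem.Dict String (List Int) :=
    (category.zip price).foldl (fun d p => d.modify p.1 [] (· ++ [p.2])) PySem.Dict.empty
  groups.values.foldl (fun total ps =>
    total + pvWsum (PySem.List.sorted ps (fun x => x) true)) 0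

-- ===== PRECONDITION & SPEC =====
-- A indexes price[i] for every i < len(category): it raises IndexError iff price is shorter than category.
def Pre_findMaximumProfit (category : List String) (price : List Int) : Prop :=
  category.length ≤ price.length
instance (category : List String) (price : List Int) : Decidable (Pre_findMaximumProfit category price) := by unfold Pre_findMaximumProfit; infer_instance

def pvWitness_findMaximumProfit : List String × List Int := (["a", "b", "a"], [3, 1, 2])

def Spec_findMaximumProfit (category : List String) (price : List Int) (out : Int) : Prop := out = findMaximumProfit_alt category price
instance (category : List String) (price : List Int) (out : Int) : Decidable (Spec_findMaximumProfit category price out) := by unfold Spec_findMaximumProfit; infer_instance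

-- ===== CLAIM (what is proved, stated in full; the proofs are below) =====
def Claim_equal_findMaximumProfit : Prop := ∀ (category : List String) (price : List Int), Dom_findMaximumProfit category price → Pre_findMaximumProfit category price → Spec_findMaximumProfit category price (findMaximumProfit category price)

-- ===== LEMMAS AND PROOFS =====

-- the prices carried by category c, in list order
def pvPricesOf (c : String) (l : List (String × Int)) : List Int :=
  (l.filter (fun p => p.1 == c)).map (·.2)

-- A's loop body, named for the proofs (definitionally the lambda in the port)
def pvStepA (st : Int × PySem.Dict String Int) (cp : String × Int) : Int × PySem.Dict String Int :=
  let d0 := st.2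
  let d1 := if d0.contains cp.1 then d0 else d0.insert cp.1 0
  let d2 := d1.insert cp.1 (d1.getD cp.1 0 + 1)
  (st.1 + cp.2 * d2.getD cp.1 0, d2)

lemma pvStepA_getD (st : Int × PySem.Dict String Int) (cp : String × Int) (c : String) :
    (pvStepA st cp).2.getD c 0 = st.2.getD c 0 + (if c = cp.1 then 1 else 0) := by
  simp only [pvStepA]
  by_cases hc : st.2.contains cp.1 <;>
    simp [hc, PySem.Dict.getD_insert] <;> split <;> simp_all [PySem.Dict.getD_of_not_contains]

lemma pvStepA_fst (st : Int × PySem.Dict String Int) (cp : String × Int) :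
    (pvStepA st cp).1 = st.1 + cp.2 * (st.2.getD cp.1 0 + 1) := by
  simp only [pvStepA]
  by_cases hc : st.2.contains cp.1 <;>
    simp [hc, PySem.Dict.getD_insert_self, PySem.Dict.getD_of_not_contains]

-- the dict in A's loop is the running per-category occurrence counter
lemma pvDictA (m : List (String × Int)) (c : String) : ∀ (t : Int) (d : PySem.Dict String Int),
    ((m.foldl pvStepA (t, d)).2).getD c 0 = d.getD c 0 + ((m.map Prod.fst).count c : Int) := by
  induction m with
  | nil => simp
  | cons x m ih =>
    intro t d
    simp only [List.foldl_cons, List.map_cons]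
    rw [show (List.foldl pvStepA (pvStepA (t, d) x) m) = List.foldl pvStepA ((pvStepA (t,d) x).1, (pvStepA (t,d) x).2) m from rfl]
    rw [ih, pvStepA_getD, List.count_cons]
    by_cases h : c = x.1
    · subst h
      rw [if_pos rfl, if_pos (by simp)]
      push_cast; ring
    · have h' : ¬ ((x.1 == c) = true) := fun hb => h (beq_iff_eq.mp hb).symm
      rw [if_neg h, if_neg h']
      push_cast; ring

lemma pvWsum_append (xs : List Int) (p : Int) :
    pvWsum (xs ++ [p]) = pvWsum xs + p * ((xs.length : Int) + 1) := by
  simp [pvWsum, PySem.List.enumerate_append, PySem.List.enumerate_cons, PySem.List.enumerate_nil]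

lemma pvPricesOf_append (c : String) (m : List (String × Int)) (x : String × Int) :
    pvPricesOf c (m ++ [x]) = pvPricesOf c m ++ (if x.1 == c then [x.2] else []) := by
  simp only [pvPricesOf, List.filter_append, List.map_append]
  by_cases h : x.1 == c <;> simp [h]

lemma pvDedup_append (ys : List String) (y : String) :
    PySem.List.dedup (ys ++ [y]) =
      if y ∈ ys then PySem.List.dedup ys else PySem.List.dedup ys ++ [y] := by
  simp only [PySem.List.dedup_eq_ofList, PySem.Set.ofList_eq_foldl, List.foldl_append,
    List.foldl_cons, List.foldl_nil]
  rw [← PySem.Set.ofList_eq_foldl]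
  by_cases h : y ∈ ys <;> simp [PySem.Set.add, PySem.Set.contains, h, PySem.Set.mem_ofList]

lemma pvCount (c : String) (m : List (String × Int)) :
    (m.map Prod.fst).count c = (pvPricesOf c m).length := by
  simp only [pvPricesOf, List.count_eq_countP, List.countP_map,
    List.length_map]
  rw [List.countP_eq_length_filter]; rfl

lemma pvPricesOf_eq_nil (c : String) (m : List (String × Int)) (h : c ∉ m.map Prod.fst) :
    pvPricesOf c m = [] := by
  simp only [pvPricesOf, List.map_eq_nil_iff, List.filter_eq_nil_iff]
  intro p hp hb
  exact h (List.mem_map.mpr ⟨p, hp, beq_iff_eq.mp hb⟩)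

-- a sum over a nodup index list in which exactly one summand changed
lemma pvSum_delta {α : Type} [DecidableEq α] (cs : List α) (hnd : cs.Nodup) (a : α) (ha : a ∈ cs)
    (f g : α → Int) (δ : Int) (h : ∀ c ∈ cs, g c = f c + if c = a then δ else 0) :
    (cs.map g).sum = (cs.map f).sum + δ := by
  induction cs with
  | nil => simp at ha
  | cons c cs ih =>
    simp only [List.map_cons, List.sum_cons]
    rcases List.mem_cons.mp ha with rfl | hmem
    · have hrest : ∀ x ∈ cs, g x = f x := by
        intro x hx
        have := h x (List.mem_cons_of_mem _ hx)
        have hne : x ≠ a := fun he => (List.nodup_cons.mp hnd).1 (he ▸ hx)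
        simpa [hne] using this
      rw [List.map_congr_left hrest, h a (List.mem_cons_self), if_pos rfl]
      ring
    · have hne : c ≠ a := fun he => (List.nodup_cons.mp hnd).1 (he ▸ hmem)
      rw [h c List.mem_cons_self, if_neg hne,
        ih (List.nodup_cons.mp hnd).2 hmem (fun x hx => h x (List.mem_cons_of_mem _ hx))]
      ring

-- A's fold, characterised per category
lemma pvTotalA (m : List (String × Int)) :
    (m.foldl pvStepA ((0 : Int), PySem.Dict.empty)).1
      = ((PySem.List.dedup (m.map Prod.fst)).map (fun c => pvWsum (pvPricesOf c m))).sum := by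
  induction m using List.reverseRecOn with
  | nil => simp [PySem.List.dedup]
  | append_singleton m x ih =>
    rw [List.foldl_append, List.foldl_cons, List.foldl_nil]
    rw [show (m.foldl pvStepA ((0 : Int), PySem.Dict.empty))
        = ((m.foldl pvStepA ((0 : Int), PySem.Dict.empty)).1,
           (m.foldl pvStepA ((0 : Int), PySem.Dict.empty)).2) from rfl,
      pvStepA_fst]
    rw [pvDictA, PySem.Dict.getD_empty, ih]
    simp only [List.map_append, List.map_cons, List.map_nil]
    rw [pvDedup_append]
    by_cases hy : x.1 ∈ m.map Prod.fst
    · rw [if_pos hy]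
      rw [pvSum_delta (PySem.List.dedup (m.map Prod.fst)) (PySem.List.nodup_dedup _) x.1
        ((PySem.List.mem_dedup _ _).mpr hy)
        (fun c => pvWsum (pvPricesOf c m))
        (fun c => pvWsum (pvPricesOf c (m ++ [x])))
        (x.2 * (((pvPricesOf x.1 m).length : Int) + 1))
        ?_]
      · rw [pvCount]; ring
      · intro c _
        beta_reduce
        rw [pvPricesOf_append]
        by_cases hc : c = x.1
        · subst hc; rw [if_pos rfl, if_pos (beq_iff_eq.mpr rfl), pvWsum_append]
        · rw [if_neg hc, if_neg (fun hb => hc (beq_iff_eq.mp hb).symm), List.append_nil]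
          ring
    · rw [if_neg hy, List.map_append, List.sum_append]
      have h0 : ((m.map Prod.fst).count x.1 : Int) = 0 := by
        simp [List.count_eq_zero_of_not_mem hy]
      rw [h0]
      have hrest : ∀ c ∈ PySem.List.dedup (m.map Prod.fst),
          pvWsum (pvPricesOf c (m ++ [x])) = pvWsum (pvPricesOf c m) := by
        intro c hc
        have hcm : c ∈ m.map Prod.fst := (PySem.List.mem_dedup _ _).mp hc
        have hne : ¬ ((x.1 == c) = true) := fun hb => hy ((beq_iff_eq.mp hb) ▸ hcm)
        rw [pvPricesOf_append, if_neg hne, List.append_nil]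
      rw [List.map_congr_left hrest]
      have hx0 : pvWsum (pvPricesOf x.1 (m ++ [x])) = x.2 := by
        rw [pvPricesOf_append, if_pos (beq_iff_eq.mpr rfl), pvPricesOf_eq_nil _ _ hy,
          List.nil_append]
        simp [pvWsum, PySem.List.enumerate_cons, PySem.List.enumerate_nil]
      simp [hx0]

-- filtering one category out of the globally descending list = that category's prices sorted descending
lemma pvSortFilter (c : String) (l : List (String × Int)) :
    pvPricesOf c (PySem.List.sorted l (fun x => x.2) true)
      = PySem.List.sorted (pvPricesOf c l) (fun x => x) true := by
  have hperm : (pvPricesOf c (PySem.List.sorted l (fun x => x.2) true)).Perm (pvPricesOf c l) :=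
    ((PySem.List.sorted_perm l (fun x => x.2) true).filter _).map _
  have hperm2 : (PySem.List.sorted (pvPricesOf c l) (fun x => x) true).Perm (pvPricesOf c l) :=
    PySem.List.sorted_perm _ _ _
  have h1 : (pvPricesOf c (PySem.List.sorted l (fun x => x.2) true)).Pairwise (fun a b => b ≤ a) := by
    have hs := PySem.List.sorted_pairwise_rev l (fun x => x.2)
    exact List.pairwise_map.mpr (hs.filter _)
  have h2 : (PySem.List.sorted (pvPricesOf c l) (fun x => x) true).Pairwise (fun a b => b ≤ a) :=
    PySem.List.sorted_pairwise_rev _ _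
  have hrev := PySem.List.eq_of_perm_of_pairwise_le_of_injective (fun x : Int => x)
    (fun a b h => h)
    (((pvPricesOf c (PySem.List.sorted l (fun x => x.2) true)).reverse_perm.trans
      (hperm.trans hperm2.symm)).trans
      (PySem.List.sorted (pvPricesOf c l) (fun x => x) true).reverse_perm.symm)
    (List.pairwise_reverse.mpr h1) (List.pairwise_reverse.mpr h2)
  exact List.reverse_inj.mp hrev

lemma pvItems (category : List String) (price : List Int) (h : category.length ≤ price.length) :
    (List.range category.length).map (fun (i : Nat) =>
      (PySem.List.pyGetD category (i : Int) "", PySem.List.pyGetD price (i : Int) 0))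
      = category.zip price := by
  apply List.ext_getElem
  · simp [List.length_zip]; omega
  · intro i h1 h2
    have hi : i < category.length := by simpa using h1
    simp only [List.getElem_map, List.getElem_range, List.getElem_zip, PySem.List.pyGetD_natCast]
    rw [List.getD_eq_getElem _ _ hi, List.getD_eq_getElem _ _ (by omega : i < price.length)]

-- B, characterised per category
lemma pvAltChar (category : List String) (price : List Int) :
    findMaximumProfit_alt category price
      = ((PySem.List.dedup ((category.zip price).map Prod.fst)).map
          (fun c => pvWsum (PySem.List.sorted (pvPricesOf c (category.zip price)) (fun x => x) true))).sum := by
  unfold findMaximumProfit_alt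
  rw [PySem.List.foldl_add (g := fun ps => pvWsum (PySem.List.sorted ps (fun x => x) true)), zero_add]
  have hnd : ((category.zip price).foldl (fun d p => d.modify p.1 [] (· ++ [p.2]))
      PySem.Dict.empty).keys.Nodup := by
    apply PySem.Dict.nodup_keys_foldl_modify_key
    exact PySem.Dict.nodup_keys_empty
  rw [PySem.Dict.values_eq_map_keys _ hnd [], List.map_map]
  rw [PySem.Dict.keys_foldl_modify_key]
  rw [PySem.Dict.keys_empty, PySem.Set.update_nil_left, ← PySem.List.dedup_eq_ofList]
  refine congrArg List.sum (List.map_congr_left ?_)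
  intro c _
  simp only [Function.comp]
  rw [PySem.Dict.getD_foldl_modify_append, PySem.Dict.getD_empty, List.nil_append]
  rfl

-- ===== VERDICT (by name: the statement is the Claim_ definition above) =====
theorem findMaximumProfit_spec : Claim_equal_findMaximumProfit := by
  intro category price _ hpre
  unfold Spec_findMaximumProfit
  have h0 : findMaximumProfit category price
      = ((PySem.List.sorted ((List.range category.length).map (fun (i : Nat) =>
            (PySem.List.pyGetD category (i : Int) "", PySem.List.pyGetD price (i : Int) 0)))
            (fun x => x.2) true).foldl pvStepA ((0 : Int), PySem.Dict.empty)).1 := rfl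
  rw [h0, pvItems category price hpre, pvTotalA, pvAltChar]
  rw [List.map_congr_left (fun c _ =>
    congrArg pvWsum (pvSortFilter c (category.zip price)))]
  refine List.Perm.sum_eq (List.Perm.map _ ?_)
  refine (List.perm_ext_iff_of_nodup (PySem.List.nodup_dedup _) (PySem.List.nodup_dedup _)).mpr ?_
  intro a
  simp [List.mem_map, PySem.List.mem_sorted]
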